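-- pv_equiv track=rewrite | github.com/ARTEAGA1811/PracticandoEjerciciosPython | semana30Agosto/gameOfLife.py | generarNUevaMatriz
-- ===== SOURCE A (Python) =====
-- def generarNUevaMatriz(B):
--     A = []
--     tamFilaB = len(B)-1
--     aux = B[tamFilaB].copy() #agrego la ultima fila
--     aux = [B[tamFilaB][-1]] + aux #agrego la ultima columna de la ultima fila, al inicio
--     aux.append(B[tamFilaB][0]) #agrego la primera columna de la ultima fila , al final
--     #agrego a A
--     A.append(aux)
--     #ahora voy recorriendo cada fila de B y solo le agrego a los extremos
--     for i in range (tamFilaB+1):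
--         auxDos = B[i].copy()
--         auxDos = [B[i][-1]] + auxDos #agrego al inicio
--         auxDos.append(B[i][0]) #agrego al final
--         #agrego en A
--         A.append(auxDos)
--     #agrego la fila del inicio al final.
--     auxTres =  B[0].copy()
--     auxTres = [B[0][-1]] + auxTres
--     auxTres.append(B[0][0])
--     A.append(auxTres)
--
--     return A
-- ===== SOURCE B (Python) =====
-- def _wrap_mod(r):
--     m = len(r)
--     return [r[(j - 1) % m] for j in range(m + 2)]
--
-- def generarNUevaMatriz(B):
--     n = len(B)
--     out = []
--     for i in range(n + 2):
--         out.append(_wrap_mod(B[(i - 1) % n]))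
--     return out
-- ===== Notes on version B (the rewrite author's own statement) =====
-- stated objective: alternative
-- what changed: Instead of A's copy-and-concatenate border wraps ([row[-1]]+copy+[row[0]] three times plus an indexed loop), B computes every cell of the (n+2)x(m+2) result directly by modular index arithmetic: output row i is built from B[(i-1) % n] and cell j from r[(j-1) % m], so no list is ever copied or concatenated.
import Mathlib
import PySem

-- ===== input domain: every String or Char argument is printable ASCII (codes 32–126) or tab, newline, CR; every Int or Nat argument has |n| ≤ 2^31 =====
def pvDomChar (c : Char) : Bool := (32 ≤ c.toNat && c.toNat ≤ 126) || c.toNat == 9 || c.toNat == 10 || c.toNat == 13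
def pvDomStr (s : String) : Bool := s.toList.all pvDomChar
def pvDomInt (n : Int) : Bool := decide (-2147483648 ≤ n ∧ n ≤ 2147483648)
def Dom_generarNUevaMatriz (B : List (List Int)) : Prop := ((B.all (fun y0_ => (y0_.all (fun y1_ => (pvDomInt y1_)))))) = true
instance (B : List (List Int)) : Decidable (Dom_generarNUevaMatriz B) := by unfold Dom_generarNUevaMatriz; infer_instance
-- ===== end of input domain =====

-- B builds the padded matrix by pure modular index arithmetic (result cell (i,j) is
-- B[(i-1) mod n][(j-1) mod m]) instead of A's copy-and-concatenate border wraps; same cost.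

-- ===== PORT A =====
-- B[i], B[i][-1], B[i][0] raise IndexError only outside Pre_; pyGetD is exact inside Pre_.
def generarNUevaMatriz (B : List (List Int)) : List (List Int) :=
  let tamFilaB : Int := (B.length : Int) - 1
  let lastRow := PySem.List.pyGetD B tamFilaB []
  let aux := PySem.List.pyGetD lastRow (-1) 0 :: lastRow ++ [PySem.List.pyGetD lastRow 0 0]
  let A1 : List (List Int) := [aux]
  let A2 := (PySem.List.pyRange 0 (tamFilaB + 1) 1).foldl (fun acc i =>
      let row := PySem.List.pyGetD B i []
      acc ++ [PySem.List.pyGetD row (-1) 0 :: row ++ [PySem.List.pyGetD row 0 0]]) A1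
  let firstRow := PySem.List.pyGetD B 0 []
  A2 ++ [PySem.List.pyGetD firstRow (-1) 0 :: firstRow ++ [PySem.List.pyGetD firstRow 0 0]]

-- ===== PORT B =====
-- [r[(j-1) % m] for j in range(m+2)]  (PySem.Int.mod is Python's %, defined for m ≠ 0; m = 0 only outside Pre_)
def pvWrapMod (r : List Int) : List Int :=
  (PySem.List.pyRange 0 ((r.length : Int) + 2) 1).map
    (fun j => PySem.List.pyGetD r (PySem.Int.mod (j - 1) (r.length : Int)) 0)

def generarNUevaMatriz_alt (B : List (List Int)) : List (List Int) :=
  (PySem.List.pyRange 0 ((B.length : Int) + 2) 1).foldl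
    (fun out i => out ++ [pvWrapMod (PySem.List.pyGetD B (PySem.Int.mod (i - 1) (B.length : Int)) [])]) []

-- ===== PRECONDITION & SPEC =====
-- Pre_ excludes exactly the inputs where Python A raises IndexError: empty B, or any empty row.
def Pre_generarNUevaMatriz (B : List (List Int)) : Prop :=
  B ≠ [] ∧ ∀ r ∈ B, r ≠ []
instance (B : List (List Int)) : Decidable (Pre_generarNUevaMatriz B) := by
  unfold Pre_generarNUevaMatriz; infer_instance
def pvWitness_generarNUevaMatriz : List (List Int) := [[1, 2], [3, 4]]

def Spec_generarNUevaMatriz (B : List (List Int)) (out : List (List Int)) : Prop := out = generarNUevaMatriz_alt B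
instance (B : List (List Int)) (out : List (List Int)) : Decidable (Spec_generarNUevaMatriz B out) := by unfold Spec_generarNUevaMatriz; infer_instance

-- ===== CLAIM =====
def Claim_equal_generarNUevaMatriz : Prop := ∀ (B : List (List Int)), Dom_generarNUevaMatriz B → Pre_generarNUevaMatriz B → Spec_generarNUevaMatriz B (generarNUevaMatriz B)

-- ===== LEMMAS AND PROOFS =====
-- wrap r = [r[-1]] + r + [r[0]]: the common normal form both ports are reduced to
def pvWrap (r : List Int) : List Int :=
  PySem.List.pyGetD r (-1) 0 :: r ++ [PySem.List.pyGetD r 0 0]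

theorem map_getD_range {α : Type} (xs : List α) (d : α) :
    (List.range xs.length).map (fun k => xs.getD k d) = xs := by
  apply List.ext_getElem
  · simp
  · intro i h1 h2
    simp [List.getD_eq_getElem?_getD, h2]

theorem mod_neg_one (n : Int) (hn : 0 < n) : PySem.Int.mod (-1) n = n - 1 := by
  rw [PySem.Int.mod_eq_emod_of_pos hn]
  have h : (-1 : Int) = (n - 1) + n * (-1) := by ring
  rw [h, Int.add_mul_emod_self_left, Int.emod_eq_of_lt (by omega) (by omega)]

theorem mod_small (k n : Int) (h0 : 0 ≤ k) (h1 : k < n) : PySem.Int.mod k n = k := by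
  rw [PySem.Int.mod_eq_emod_of_pos (by omega), Int.emod_eq_of_lt h0 h1]

theorem pyGetD_last {α : Type} (xs : List α) (d : α) (h : xs ≠ []) :
    PySem.List.pyGetD xs ((xs.length : Int) - 1) d = xs.getLast h := by
  have hl : 0 < xs.length := List.length_pos_iff.mpr h
  rw [PySem.List.pyGetD_eq_getElem _ _ (by omega) (by omega)]
  have ht : (((xs.length : Int)) - 1).toNat = xs.length - 1 := by omega
  simp [ht, List.getLast_eq_getElem]

-- row lemma: modular wrapping of a nonempty row is [r[-1]] + r + [r[0]]
theorem pvWrapMod_eq (r : List Int) (hr : r ≠ []) : pvWrapMod r = pvWrap r := by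
  have hm : 0 < r.length := List.length_pos_iff.mpr hr
  unfold pvWrapMod pvWrap
  have hsplit : PySem.List.pyRange 0 ((r.length : Int) + 2) 1
      = 0 :: (PySem.List.pyRange 1 ((r.length : Int) + 1) 1 ++ [(r.length : Int) + 1]) := by
    rw [show ((r.length : Int) + 2) = ((r.length : Int) + 1) + 1 by ring,
        PySem.List.pyRange_one_succ_right (by omega), PySem.List.pyRange_one_cons (by omega)]
    simp
  rw [hsplit]
  simp only [List.map_append, List.map]
  congr 1
  · rw [show ((0 : Int) - 1) = -1 by ring, mod_neg_one _ (by exact_mod_cast hm),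
        pyGetD_last r 0 hr, PySem.List.pyGetD_neg_one r 0 hr]
  · congr 1
    · rw [PySem.List.pyRange_one, List.map_map]
      have : ∀ k ∈ List.range ((((r.length : Int) + 1) - 1).toNat),
          ((fun j => PySem.List.pyGetD r (PySem.Int.mod (j - 1) (r.length : Int)) 0) ∘ fun k : Nat => (1 : Int) + (k : Int)) k
          = r.getD k 0 := by
        intro k hk
        simp only [List.mem_range] at hk
        have hk' : k < r.length := by omega
        simp only [Function.comp]
        rw [show ((1 : Int) + k - 1) = (k : Int) by ring,
            mod_small _ _ (by omega) (by exact_mod_cast hk'),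
            PySem.List.pyGetD_natCast]
      rw [List.map_congr_left this]
      have ht : (((r.length : Int) + 1) - 1).toNat = r.length := by omega
      rw [ht, map_getD_range]
    · rw [show ((r.length : Int) + 1 - 1) = (r.length : Int) by ring,
          PySem.Int.mod_eq_emod_of_pos (by exact_mod_cast hm), Int.emod_self,
          PySem.List.pyGetD_zero]

-- A's value in normal form
theorem portA_eq (B : List (List Int)) (hB : B ≠ []) :
    generarNUevaMatriz B = pvWrap (B.getLast hB) :: B.map pvWrap ++ [pvWrap (B.head hB)] := by
  unfold generarNUevaMatriz
  dsimp only
  have hstep : ((B.length : Int) - 1 + 1) = (B.length : Int) := by ring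
  rw [hstep, PySem.List.foldl_pyRange_zero_pyGetD' B ([] : List Int)
      (fun acc row => acc ++ [PySem.List.pyGetD row (-1) 0 :: row ++ [PySem.List.pyGetD row 0 0]]),
      PySem.List.foldl_append_singleton_eq_map
        (fun row => PySem.List.pyGetD row (-1) 0 :: row ++ [PySem.List.pyGetD row 0 0]) B,
      pyGetD_last B [] hB]
  cases B with
  | nil => exact absurd rfl hB
  | cons b bs => simp [pvWrap, PySem.List.pyGetD_zero_cons]

-- B's value in normal form
theorem portB_eq (B : List (List Int)) (hB : B ≠ []) (hrows : ∀ r ∈ B, r ≠ []) :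
    generarNUevaMatriz_alt B = pvWrap (B.getLast hB) :: B.map pvWrap ++ [pvWrap (B.head hB)] := by
  have hn : 0 < B.length := List.length_pos_iff.mpr hB
  unfold generarNUevaMatriz_alt
  rw [PySem.List.foldl_append_singleton_eq_map
       (fun i => pvWrapMod (PySem.List.pyGetD B (PySem.Int.mod (i - 1) (B.length : Int)) []))]
  have hsplit : PySem.List.pyRange 0 ((B.length : Int) + 2) 1
      = 0 :: (PySem.List.pyRange 1 ((B.length : Int) + 1) 1 ++ [(B.length : Int) + 1]) := by
    rw [show ((B.length : Int) + 2) = ((B.length : Int) + 1) + 1 by ring,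
        PySem.List.pyRange_one_succ_right (by omega), PySem.List.pyRange_one_cons (by omega)]
    simp
  rw [hsplit]
  simp only [List.map_append, List.map, List.nil_append]
  congr 1
  · rw [show ((0 : Int) - 1) = -1 by ring, mod_neg_one _ (by exact_mod_cast hn),
        pyGetD_last B [] hB, pvWrapMod_eq _ (List.getLast_mem hB |> hrows _)]
  · congr 1
    · rw [PySem.List.pyRange_one, List.map_map]
      have : ∀ k ∈ List.range ((((B.length : Int) + 1) - 1).toNat),
          ((fun i => pvWrapMod (PySem.List.pyGetD B (PySem.Int.mod (i - 1) (B.length : Int)) [])) ∘ fun k : Nat => (1 : Int) + (k : Int)) k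
          = pvWrap (B.getD k []) := by
        intro k hk
        simp only [List.mem_range] at hk
        have hk' : k < B.length := by omega
        simp only [Function.comp]
        rw [show ((1 : Int) + k - 1) = (k : Int) by ring,
            mod_small _ _ (by omega) (by exact_mod_cast hk'),
            PySem.List.pyGetD_natCast, pvWrapMod_eq]
        exact hrows _ (by rw [List.getD_eq_getElem _ _ hk']; exact List.getElem_mem hk')
      rw [List.map_congr_left this]
      have ht : (((B.length : Int) + 1) - 1).toNat = B.length := by omega
      rw [ht]
      have := map_getD_range B ([] : List Int)
      calc (List.range B.length).map (fun k => pvWrap (B.getD k []))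
          = ((List.range B.length).map (fun k => B.getD k [])).map pvWrap := by
            simp [List.map_map]
        _ = B.map pvWrap := by rw [map_getD_range]
    · rw [show ((B.length : Int) + 1 - 1) = (B.length : Int) by ring,
          PySem.Int.mod_eq_emod_of_pos (by exact_mod_cast hn), Int.emod_self,
          PySem.List.pyGetD_zero]
      cases B with
      | nil => exact absurd rfl hB
      | cons b bs => simp [pvWrapMod_eq _ (hrows b (by simp))]

-- ===== VERDICT =====
theorem generarNUevaMatriz_spec : Claim_equal_generarNUevaMatriz := by
  intro B _ hPre
  unfold Spec_generarNUevaMatriz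
  rw [portA_eq B hPre.1, portB_eq B hPre.1 hPre.2]
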